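-- pv_equiv track=rewrite | github.com/shyguyrymakesai/WhatsApp_AI_Agent | src/utils/time_utils.py | detect_weekday_in_message
-- ===== SOURCE A (Python) =====
-- def detect_weekday_in_message(message: str) -> bool:
--     weekdays = [
--         "monday",
--         "tuesday",
--         "wednesday",
--         "thursday",
--         "friday",
--         "saturday",
--         "sunday",
--     ]
--     message = message.lower()
--     return any(day in message for day in weekdays)
-- ===== SOURCE B (Python) =====
-- def detect_weekday_in_message(message: str) -> bool:
--     # Anchor on the common suffix "day": every weekday name is <prefix> + "day",
--     # so scan positions j where "day" starts and check that one of the seven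
--     # prefixes ends just before j. Single pass, no seven separate searches.
--     prefixes = ("mon", "tues", "wednes", "thurs", "fri", "satur", "sun")
--     text = message.lower()
--     return any(
--         text[j:j + 3] == "day" and text.endswith(prefixes, 0, j)
--         for j in range(len(text))
--     )
-- ===== Notes on version B (the rewrite author's own statement) =====
-- stated objective: alternative
-- what changed: B exploits that every weekday name is prefix+"day": it scans the lowered text once for occurrences of "day" and checks whether one of the seven prefixes ends right before, instead of running seven independent substring searches.
import Mathlib
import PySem

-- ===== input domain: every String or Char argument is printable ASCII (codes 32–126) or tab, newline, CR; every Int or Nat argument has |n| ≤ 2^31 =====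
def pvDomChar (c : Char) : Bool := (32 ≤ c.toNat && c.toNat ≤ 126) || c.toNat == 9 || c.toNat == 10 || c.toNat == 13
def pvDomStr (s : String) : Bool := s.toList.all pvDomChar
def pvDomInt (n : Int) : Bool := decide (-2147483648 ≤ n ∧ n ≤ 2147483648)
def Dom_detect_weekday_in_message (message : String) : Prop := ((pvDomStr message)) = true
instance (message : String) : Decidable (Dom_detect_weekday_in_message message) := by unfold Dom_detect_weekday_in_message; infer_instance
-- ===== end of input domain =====

-- B anchors on the shared suffix "day" and scans the text once, checking a weekday prefix
-- ends just before each "day" occurrence, instead of seven independent substring searches (alternative).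


-- ===== PORT A =====
def detect_weekday_in_message (message : String) : Bool :=
  let weekdays : List (List Char) :=
    ["monday".toList, "tuesday".toList, "wednesday".toList, "thursday".toList,
     "friday".toList, "saturday".toList, "sunday".toList]
  let m := PySem.Chars.lower message.toList
  weekdays.any (fun day => PySem.Chars.isIn day m)

-- ===== PORT B =====
def detect_weekday_in_message_alt (message : String) : Bool :=
  let prefixes : List (List Char) :=
    ["mon".toList, "tues".toList, "wednes".toList, "thurs".toList,
     "fri".toList, "satur".toList, "sun".toList]
  let text := PySem.Chars.lower message.toList
  (PySem.List.pyRange 0 (text.length : Int) 1).any (fun j =>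
    (PySem.List.slice text (some j) (some (j + 3)) == "day".toList)
      -- text.endswith(prefixes, 0, j): Python's bounded endswith = endswith of text[0:j] (exact for 0 ≤ j)
      && prefixes.any (fun p => PySem.Chars.endswith (PySem.List.slice text none (some j)) p))

-- ===== PRECONDITION & SPEC =====
def Spec_detect_weekday_in_message (message : String) (out : Bool) : Prop := out = detect_weekday_in_message_alt message
instance (message : String) (out : Bool) : Decidable (Spec_detect_weekday_in_message message out) := by unfold Spec_detect_weekday_in_message; infer_instance

-- ===== CLAIM (what is proved, stated in full; the proofs are below) =====
def Claim_equal_detect_weekday_in_message : Prop := ∀ (message : String), Dom_detect_weekday_in_message message → Spec_detect_weekday_in_message message (detect_weekday_in_message message)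

-- ===== LEMMAS AND PROOFS =====

-- An occurrence of p ++ w inside cs is exactly a cut point k where p ends and w begins.
lemma pv_infix_decomp {α : Type} (cs p w : List α) (hw : w ≠ []) :
    (p ++ w) <:+: cs ↔ ∃ k : Nat, k < cs.length ∧ w <+: cs.drop k ∧ p <:+ cs.take k := by
  constructor
  · rintro ⟨s, t, h⟩
    refine ⟨s.length + p.length, ?_, ?_, ?_⟩
    · have hlen := congrArg List.length h
      have hwpos : 0 < w.length := List.length_pos_of_ne_nil hw
      simp [List.length_append] at hlen
      omega
    · rw [show s ++ (p ++ w) ++ t = (s ++ p) ++ (w ++ t) by simp] at h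
      rw [← h, List.drop_left' (by simp)]
      exact ⟨t, rfl⟩
    · rw [show s ++ (p ++ w) ++ t = (s ++ p) ++ (w ++ t) by simp] at h
      rw [← h, List.take_left' (by simp)]
      exact ⟨s, rfl⟩
  · rintro ⟨k, hk, ⟨v, hv⟩, ⟨u, hu⟩⟩
    refine ⟨u, v, ?_⟩
    calc u ++ (p ++ w) ++ v = (u ++ p) ++ (w ++ v) := by simp
    _ = cs.take k ++ cs.drop k := by rw [hu, hv]
    _ = cs := List.take_append_drop k cs

-- The two bodies agree on any character list.
lemma pv_main (cs : List Char) :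
    (["monday".toList, "tuesday".toList, "wednesday".toList, "thursday".toList,
      "friday".toList, "saturday".toList, "sunday".toList].any
        (fun day => PySem.Chars.isIn day cs))
    = (PySem.List.pyRange 0 (cs.length : Int) 1).any (fun j =>
        (PySem.List.slice cs (some j) (some (j + 3)) == "day".toList)
        && ["mon".toList, "tues".toList, "wednes".toList, "thurs".toList,
            "fri".toList, "satur".toList, "sun".toList].any
              (fun p => PySem.Chars.endswith (PySem.List.slice cs none (some j)) p)) := by
  have hmap : (["monday".toList, "tuesday".toList, "wednesday".toList, "thursday".toList,
      "friday".toList, "saturday".toList, "sunday".toList] : List (List Char))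
      = (["mon".toList, "tues".toList, "wednes".toList, "thurs".toList,
          "fri".toList, "satur".toList, "sun".toList] : List (List Char)).map
            (fun p => p ++ "day".toList) := by decide
  rw [hmap, List.any_map, Bool.eq_iff_iff]
  simp only [List.any_eq_true, Function.comp, PySem.Chars.isIn_iff_infix,
    PySem.Chars.endswith_iff, PySem.List.mem_pyRange_one, beq_iff_eq, Bool.and_eq_true]
  constructor
  · rintro ⟨p, hp, hinf⟩
    rw [pv_infix_decomp cs p ("day".toList) (by decide)] at hinf
    obtain ⟨k, hk, hday, hpre⟩ := hinf
    refine ⟨(k : Int), ⟨by positivity, by exact_mod_cast hk⟩, ?_, p, hp, ?_⟩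
    · have h3 : ((k : Int) + 3) = ((k + 3 : Nat) : Int) := by push_cast; ring
      rw [h3, PySem.List.slice_natCast]
      have : k + 3 - k = 3 := by omega
      rw [this]
      have := (List.prefix_iff_eq_take.mp hday)
      simpa using this.symm
    · rw [PySem.List.slice_to_natCast]
      exact hpre
  · rintro ⟨j, ⟨hj0, hjlen⟩, hslice, p, hp, hpre⟩
    refine ⟨p, hp, ?_⟩
    rw [pv_infix_decomp cs p ("day".toList) (by decide)]
    obtain ⟨k, rfl⟩ := Int.eq_ofNat_of_zero_le hj0
    refine ⟨k, by exact_mod_cast hjlen, ?_, ?_⟩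
    · have h3 : ((k : Int) + 3) = ((k + 3 : Nat) : Int) := by push_cast; ring
      rw [h3, PySem.List.slice_natCast] at hslice
      have : k + 3 - k = 3 := by omega
      rw [this] at hslice
      exact List.prefix_iff_eq_take.mpr (by simpa using hslice.symm)
    · rw [PySem.List.slice_to_natCast] at hpre
      exact hpre

-- ===== VERDICT (by name: the statement is the Claim_ definition above) =====
theorem detect_weekday_in_message_spec : Claim_equal_detect_weekday_in_message := by
  intro message _
  unfold Spec_detect_weekday_in_message detect_weekday_in_message detect_weekday_in_message_alt
  exact pv_main (PySem.Chars.lower message.toList)
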